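-- pv_equiv track=rewrite | github.com/plinioSMoraes/PythonCourse | day1.3/courseExamples.py | get_most_ordered_dish_per_costumer
-- ===== SOURCE A (Python) =====
-- def get_most_ordered_dish_per_costumer(orders, customer):
--     max_amount = 0
--     most_ordered = ""
--     customer_dishes = {}
--
--     for order in orders:
--         if order["customer"] == customer:
--             customer_dishes[order["order"]] = (
--                 customer_dishes.get(order["order"], 0) + 1
--             )
--             if customer_dishes[order["order"]] >= max_amount:
--                 max_amount = customer_dishes[order["order"]]
--                 most_ordered = order["order"]
--     return most_ordered
-- ===== SOURCE B (Python) =====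
-- def get_most_ordered_dish_per_costumer(orders, customer):
--     counts = {}
--     for order in orders:
--         if order["customer"] == customer:
--             dish = order["order"]
--             counts[dish] = counts.get(dish, 0) + 1
--     if not counts:
--         return ""
--     m = max(counts.values())
--     for order in reversed(orders):
--         if order["customer"] == customer and counts[order["order"]] == m:
--             return order["order"]
--     return ""
-- ===== Notes on version B (the rewrite author's own statement) =====
-- stated objective: alternative
-- what changed: Replaces A's single running-max pass (dict + running max/most updated on every '>=' hit) with a count table built once over the matching orders, then max of the counts and a reverse scan returning the first matching order whose dish attains that maximum (which reproduces A's latest-to-reach-the-max tie-break).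
import Mathlib
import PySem

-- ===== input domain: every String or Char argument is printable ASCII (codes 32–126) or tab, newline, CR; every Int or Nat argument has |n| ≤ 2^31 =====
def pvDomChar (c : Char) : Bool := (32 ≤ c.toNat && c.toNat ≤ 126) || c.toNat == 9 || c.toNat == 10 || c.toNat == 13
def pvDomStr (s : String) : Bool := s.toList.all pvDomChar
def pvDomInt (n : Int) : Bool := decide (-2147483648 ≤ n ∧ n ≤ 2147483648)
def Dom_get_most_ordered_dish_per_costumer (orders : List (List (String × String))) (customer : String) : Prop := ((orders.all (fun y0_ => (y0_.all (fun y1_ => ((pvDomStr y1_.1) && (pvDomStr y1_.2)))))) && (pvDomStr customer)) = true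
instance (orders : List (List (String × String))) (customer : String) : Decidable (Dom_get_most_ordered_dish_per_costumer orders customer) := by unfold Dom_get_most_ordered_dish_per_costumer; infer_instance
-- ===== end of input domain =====

-- B replaces A's single running-max pass by: build the count table once, take the max count,
-- then scan the orders in reverse for the first matching order whose dish attains it (alternative decomposition, same cost).

-- shared helper: order["k"] lookup (dict → association list, first match; "" default only reached outside Pre_)
def pvKey (o : List (String × String)) (k : String) : String := (PySem.Dict.mk o).getD k ""

-- ===== PORT A =====
def get_most_ordered_dish_per_costumer (orders : List (List (String × String))) (customer : String) : String :=
  let st := orders.foldl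
    (fun (s : Int × String × PySem.Dict String Int) order =>
      if pvKey order "customer" == customer then
        let dish := pvKey order "order"
        let cd := s.2.2.insert dish (s.2.2.getD dish 0 + 1)
        if cd.getD dish 0 ≥ s.1 then (cd.getD dish 0, dish, cd)
        else (s.1, s.2.1, cd)
      else s)
    (0, "", PySem.Dict.empty)
  st.2.1

-- ===== PORT B =====
def get_most_ordered_dish_per_costumer_alt (orders : List (List (String × String))) (customer : String) : String :=
  let counts := orders.foldl
    (fun (d : PySem.Dict String Int) order =>
      if pvKey order "customer" == customer then
        d.insert (pvKey order "order") (d.getD (pvKey order "order") 0 + 1)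
      else d)
    PySem.Dict.empty
  if counts.size = 0 then ""
  else
    match PySem.List.max? counts.values (fun v => v) with
    | none => ""  -- unreachable: counts is nonempty here, so max? returns some
    | some m =>
      match orders.reverse.find? (fun order =>
          pvKey order "customer" == customer && counts.getD (pvKey order "order") 0 == m) with
      | some order => pvKey order "order"
      | none => ""  -- Source B's trailing 'return ""' (unreachable: the max is attained)

-- ===== PRECONDITION & SPEC =====
-- Pre_ excludes exactly the inputs where Python A raises KeyError: an order without a
-- "customer" key, or a matching order without an "order" key.
def Pre_get_most_ordered_dish_per_costumer (orders : List (List (String × String))) (customer : String) : Prop :=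
  ∀ o ∈ orders, (PySem.Dict.mk o).contains "customer" = true ∧
    (pvKey o "customer" = customer → (PySem.Dict.mk o).contains "order" = true)
instance (orders : List (List (String × String))) (customer : String) : Decidable (Pre_get_most_ordered_dish_per_costumer orders customer) := by unfold Pre_get_most_ordered_dish_per_costumer; infer_instance
def pvWitness_get_most_ordered_dish_per_costumer : (List (List (String × String))) × String :=
  ([[("customer", "bob"), ("order", "pizza")], [("customer", "ann"), ("order", "soup")]], "bob")

def Spec_get_most_ordered_dish_per_costumer (orders : List (List (String × String))) (customer : String) (out : String) : Prop := out = get_most_ordered_dish_per_costumer_alt orders customer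
instance (orders : List (List (String × String))) (customer : String) (out : String) : Decidable (Spec_get_most_ordered_dish_per_costumer orders customer out) := by unfold Spec_get_most_ordered_dish_per_costumer; infer_instance

-- ===== CLAIM (what is proved, stated in full; the proofs are below) =====
def Claim_equal_get_most_ordered_dish_per_costumer : Prop := ∀ (orders : List (List (String × String))) (customer : String), Dom_get_most_ordered_dish_per_costumer orders customer → Pre_get_most_ordered_dish_per_costumer orders customer → Spec_get_most_ordered_dish_per_costumer orders customer (get_most_ordered_dish_per_costumer orders customer)

-- ===== LEMMAS AND PROOFS =====

-- the dishes of the matching orders, in order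
def pvDishes (c : String) (l : List (List (String × String))) : List String :=
  (l.filter (fun o => pvKey o "customer" == c)).map (fun o => pvKey o "order")

-- A's per-matching-order state update
def pvGA (s : Int × String × PySem.Dict String Int) (x : String) : Int × String × PySem.Dict String Int :=
  let cd := s.2.2.insert x (s.2.2.getD x 0 + 1)
  if cd.getD x 0 ≥ s.1 then (cd.getD x 0, x, cd) else (s.1, s.2.1, cd)

-- B's per-matching-order count update
def pvGC (d : PySem.Dict String Int) (x : String) : PySem.Dict String Int :=
  d.insert x (d.getD x 0 + 1)

def pvFoldA (L : List String) : Int × String × PySem.Dict String Int :=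
  L.foldl pvGA (0, "", PySem.Dict.empty)

lemma pvFoldl_match_factor {σ : Type} (c : String) (g : σ → String → σ) :
    ∀ (l : List (List (String × String))) (s : σ),
      l.foldl (fun s o => if pvKey o "customer" == c then g s (pvKey o "order") else s) s
        = (pvDishes c l).foldl g s := by
  intro l
  induction l with
  | nil => intro s; rfl
  | cons o t ih =>
    intro s
    cases h : pvKey o "customer" == c <;>
      simp only [List.foldl_cons, pvDishes, List.filter_cons, h, if_true, if_false,
        Bool.false_eq_true, List.map_cons] <;>
      simpa [pvDishes] using ih _

lemma pvDishes_reverse (c : String) (l : List (List (String × String))) :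
    pvDishes c l.reverse = (pvDishes c l).reverse := by
  simp [pvDishes, List.filter_reverse, List.map_reverse]

lemma pvFind_factor (c : String) (P : String → Bool) :
    ∀ (l : List (List (String × String))),
      (l.find? (fun o => pvKey o "customer" == c && P (pvKey o "order"))).map
          (fun o => pvKey o "order")
        = (pvDishes c l).find? P := by
  intro l
  induction l with
  | nil => rfl
  | cons o t ih =>
    cases h : pvKey o "customer" == c
    · simpa [pvDishes, List.filter_cons, List.find?_cons, h] using ih
    · cases hp : P (pvKey o "order") <;>
        simpa [pvDishes, List.filter_cons, List.find?_cons, h, hp] using ih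

lemma pvFind?_congr_mem {α : Type} (l : List α) (p q : α → Bool)
    (h : ∀ a ∈ l, p a = q a) : l.find? p = l.find? q := by
  induction l with
  | nil => rfl
  | cons a t ih =>
    simp only [List.find?_cons]
    rw [h a (List.mem_cons_self)]
    cases q a
    · exact ih (fun b hb => h b (List.mem_cons_of_mem _ hb))
    · rfl

lemma pvCounter_snoc (L : List String) (x : String) :
    PySem.Dict.counter (L ++ [x])
      = (PySem.Dict.counter L).insert x ((PySem.Dict.counter L).getD x 0 + 1) := by
  rw [← PySem.Dict.foldl_insert_getD_add_one_eq_counter,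
      ← PySem.Dict.foldl_insert_getD_add_one_eq_counter, List.foldl_append]
  rfl

lemma pvCount_snoc_self (L : List String) (x : String) :
    (((L ++ [x]).count x : Nat) : Int) = (L.count x : Int) + 1 := by
  simp [List.count_append]

lemma pvCount_snoc_ne (L : List String) (x y : String) (h : y ≠ x) :
    (L ++ [x]).count y = L.count y := by
  have h0 : [x].count y = 0 := by
    simp [List.count_singleton]
    exact fun e => h e.symm
  simp [List.count_append, h0]

lemma pvInv (L : List String) :
    (pvFoldA L).2.2 = PySem.Dict.counter L
  ∧ (∀ x : String, ((L.count x : Int)) ≤ (pvFoldA L).1)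
  ∧ (L ≠ [] → ∃ x ∈ L, ((L.count x : Int)) = (pvFoldA L).1)
  ∧ (pvFoldA L).2.1
      = (match L.reverse.find? (fun x => (L.count x : Int) == (pvFoldA L).1) with
         | some x => x | none => "") := by
  induction L using List.reverseRecOn with
  | nil =>
    refine ⟨rfl, ?_, ?_, rfl⟩
    · intro x; simp [pvFoldA]
    · intro h; exact absurd rfl h
  | append_singleton L x ih =>
    obtain ⟨ih1, ih2, ih3, ih4⟩ := ih
    have hstep : pvFoldA (L ++ [x]) = pvGA (pvFoldA L) x := by
      simp [pvFoldA, List.foldl_append]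
    have hGA : pvGA (pvFoldA L) x =
        (if (pvFoldA L).1 ≤ ((L ++ [x]).count x : Int)
         then (((L ++ [x]).count x : Int), x, PySem.Dict.counter (L ++ [x]))
         else ((pvFoldA L).1, (pvFoldA L).2.1, PySem.Dict.counter (L ++ [x]))) := by
      have hcd : (pvFoldA L).2.2.insert x ((pvFoldA L).2.2.getD x 0 + 1)
          = PySem.Dict.counter (L ++ [x]) := by
        rw [ih1]; exact (pvCounter_snoc L x).symm
      have hgd : (PySem.Dict.counter (L ++ [x])).getD x 0 = ((L ++ [x]).count x : Int) :=
        PySem.Dict.getD_counter _ _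
      simp only [pvGA, hcd, hgd, ge_iff_le]
    rw [hGA] at hstep
    by_cases hc : (pvFoldA L).1 ≤ ((L ++ [x]).count x : Int)
    · rw [if_pos hc] at hstep
      refine ⟨by rw [hstep], ?_, ?_, ?_⟩
      · intro y
        rw [hstep]
        by_cases hyx : y = x
        · subst hyx; exact le_refl _
        · rw [pvCount_snoc_ne L x y hyx]
          exact le_trans (ih2 y) hc
      · intro _
        exact ⟨x, by simp, by rw [hstep]⟩
      · rw [hstep]
        have hrev : (L ++ [x]).reverse = x :: L.reverse := by simp
        rw [hrev]
        rw [List.find?_cons_of_pos (by simp)]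
    · rw [if_neg hc] at hstep
      have hne : L ≠ [] := by
        rintro rfl
        exact hc (by simp [pvFoldA])
      have hlt : ((L ++ [x]).count x : Int) < (pvFoldA L).1 := lt_of_not_ge hc
      have hcx : ((L ++ [x]).count x : Int) = (L.count x : Int) + 1 := pvCount_snoc_self L x
      refine ⟨by rw [hstep], ?_, ?_, ?_⟩
      · intro y
        rw [hstep]
        by_cases hyx : y = x
        · subst hyx; exact le_of_lt hlt
        · rw [pvCount_snoc_ne L x y hyx]; exact ih2 y
      · intro _
        obtain ⟨z, hzL, hz⟩ := ih3 hne
        have hzx : z ≠ x := by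
          rintro rfl
          rw [← hz] at hlt
          omega
        refine ⟨z, List.mem_append_left _ hzL, ?_⟩
        rw [hstep, pvCount_snoc_ne L x z hzx]
        exact hz
      · rw [hstep]
        have hrev : (L ++ [x]).reverse = x :: L.reverse := by simp
        rw [hrev]
        have hx1 : (((L ++ [x]).count x : Int) == (pvFoldA L).1) = false := by
          simp only [beq_eq_false_iff_ne, ne_eq]
          omega
        rw [List.find?_cons_of_neg (by simp; omega)]
        have hcongr : L.reverse.find? (fun y => ((L ++ [x]).count y : Int) == (pvFoldA L).1)
            = L.reverse.find? (fun y => ((L.count y : Int)) == (pvFoldA L).1) := by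
          apply pvFind?_congr_mem
          intro y hy
          by_cases hyx : y = x
          · subst hyx
            have h2 : (((L.count y : Int)) == (pvFoldA L).1) = false := by
              simp only [beq_eq_false_iff_ne, ne_eq]
              omega
            rw [hx1, h2]
          · rw [pvCount_snoc_ne L x y hyx]
        rw [hcongr]
        exact ih4

-- ===== VERDICT (by name: the statement is the Claim_ definition above) =====
theorem get_most_ordered_dish_per_costumer_spec : Claim_equal_get_most_ordered_dish_per_costumer := by
  intro orders customer hdom hpre
  unfold Spec_get_most_ordered_dish_per_costumer
  obtain ⟨ih1, ih2, ih3, ih4⟩ := pvInv (pvDishes customer orders)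
  have hA : get_most_ordered_dish_per_costumer orders customer
      = (pvFoldA (pvDishes customer orders)).2.1 :=
    congrArg (fun s => s.2.1) (pvFoldl_match_factor customer pvGA orders (0, "", PySem.Dict.empty))
  have hG : orders.foldl
      (fun (d : PySem.Dict String Int) order =>
        if pvKey order "customer" == customer then
          d.insert (pvKey order "order") (d.getD (pvKey order "order") 0 + 1)
        else d) PySem.Dict.empty
      = PySem.Dict.counter (pvDishes customer orders) :=
    (pvFoldl_match_factor customer pvGC orders PySem.Dict.empty).trans
      (PySem.Dict.foldl_insert_getD_add_one_eq_counter _)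
  rw [hA]
  simp only [get_most_ordered_dish_per_costumer_alt, hG]
  by_cases hnil : pvDishes customer orders = []
  · rw [hnil]
    have hce : PySem.Dict.counter ([] : List String) = PySem.Dict.empty := rfl
    simp [pvFoldA, hce]
  · obtain ⟨y, hyL⟩ := List.exists_mem_of_ne_nil _ hnil
    have hky : y ∈ (PySem.Dict.counter (pvDishes customer orders)).keys := by
      rw [PySem.Dict.keys_counter]
      exact (PySem.Set.mem_ofList _ _).mpr hyL
    have hitems : (PySem.Dict.counter (pvDishes customer orders)).items ≠ [] := by
      intro h0
      simp [PySem.Dict.keys, h0] at hky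
    have hsz : ¬ (PySem.Dict.counter (pvDishes customer orders)).size = 0 := by
      intro h0
      exact hitems (List.eq_nil_of_length_eq_zero h0)
    rw [if_neg hsz]
    cases hm : PySem.List.max? (PySem.Dict.counter (pvDishes customer orders)).values (fun v => v) with
    | none =>
      exfalso
      have hv : (PySem.Dict.counter (pvDishes customer orders)).values = [] :=
        (PySem.List.max?_eq_none_iff _ _).mp hm
      exact hitems (by simpa [PySem.Dict.values] using hv)
    | some m =>
      have hmem := PySem.List.max?_mem hm
      have hmax := PySem.List.max?_isMax hm
      have hvals : (PySem.Dict.counter (pvDishes customer orders)).values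
          = (PySem.Dict.counter (pvDishes customer orders)).keys.map
              (fun k => (PySem.Dict.counter (pvDishes customer orders)).getD k 0) :=
        PySem.Dict.values_eq_map_keys _ (PySem.Dict.nodup_keys_counter _) 0
      have hmle : m ≤ (pvFoldA (pvDishes customer orders)).1 := by
        rw [hvals] at hmem
        obtain ⟨k, hk, hkm⟩ := List.mem_map.mp hmem
        rw [PySem.Dict.keys_counter] at hk
        have hkL : k ∈ pvDishes customer orders := (PySem.Set.mem_ofList _ _).mp hk
        rw [PySem.Dict.getD_counter] at hkm
        rw [← hkm]
        exact ih2 k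
      have hlem : (pvFoldA (pvDishes customer orders)).1 ≤ m := by
        obtain ⟨z, hzL, hz⟩ := ih3 hnil
        have hzv : ((pvDishes customer orders).count z : Int)
            ∈ (PySem.Dict.counter (pvDishes customer orders)).values := by
          rw [hvals]
          refine List.mem_map.mpr ⟨z, ?_, ?_⟩
          · rw [PySem.Dict.keys_counter]; exact (PySem.Set.mem_ofList _ _).mpr hzL
          · rw [PySem.Dict.getD_counter]
        rw [← hz]
        exact hmax _ hzv
      have hms : m = (pvFoldA (pvDishes customer orders)).1 := le_antisymm hmle hlem
      have hff := pvFind_factor customer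
        (fun x => (PySem.Dict.counter (pvDishes customer orders)).getD x 0 == m) orders.reverse
      rw [pvDishes_reverse] at hff
      have hpred : (fun x => ((PySem.Dict.counter (pvDishes customer orders)).getD x 0 == m))
          = (fun x => (((pvDishes customer orders).count x : Int)
              == (pvFoldA (pvDishes customer orders)).1)) := by
        funext z
        rw [PySem.Dict.getD_counter, hms]
      rw [hpred] at hff
      simp only [] at hff ⊢
      cases hfo : orders.reverse.find? (fun order =>
          pvKey order "customer" == customer
            && (PySem.Dict.counter (pvDishes customer orders)).getD (pvKey order "order") 0 == m) with
      | none =>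
        rw [hfo] at hff
        simp only [Option.map_none] at hff
        rw [ih4, ← hff]
      | some o =>
        rw [hfo] at hff
        simp only [Option.map_some] at hff
        rw [ih4, ← hff]
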